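-- pv_equiv track=rewrite | github.com/hayeonkimmie/Programmers | jieun/programmers/basic/230622_re.py | solution
-- ===== SOURCE A (Python) =====
-- def solution(n):
--     str = ''
--     for i in range(1, n+1):
--         if i % 2 != 0:
--             str += '수'
--         else:
--             str += '박'
--
--     return str
-- ===== SOURCE B (Python) =====
-- def solution(n):
--     return ("수박" * ((n + 1) // 2))[:n]
-- ===== Notes on version B (the rewrite author's own statement) =====
-- stated objective: simpler
-- what changed: Replaces the per-index loop with its parity branch by a closed-form construction: repeat the two-character block '수박' ceil(n/2) times and slice to length n, avoiding n incremental string concatenations.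
import Mathlib
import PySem

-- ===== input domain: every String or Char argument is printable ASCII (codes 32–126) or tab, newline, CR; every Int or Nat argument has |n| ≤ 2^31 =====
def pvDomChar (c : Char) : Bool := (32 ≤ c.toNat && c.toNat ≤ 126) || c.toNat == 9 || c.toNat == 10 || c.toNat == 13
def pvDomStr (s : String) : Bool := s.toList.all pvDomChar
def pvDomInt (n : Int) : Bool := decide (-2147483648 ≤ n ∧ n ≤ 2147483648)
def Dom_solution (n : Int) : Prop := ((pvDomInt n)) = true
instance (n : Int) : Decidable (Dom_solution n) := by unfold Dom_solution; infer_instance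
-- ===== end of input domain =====

-- B builds the string in closed form (repeat the block '수박', then slice to length n) instead of A's per-index loop with a parity branch; objective: simpler.

-- ===== PORT A =====
-- str = ''; for i in range(1, n+1): str += '수' if i % 2 != 0 else '박'; return str
def solution (n : Int) : String :=
  String.ofList ((PySem.List.pyRange 1 (n + 1) 1).foldl
    (fun acc i => acc ++ (if PySem.Int.mod i 2 ≠ 0 then ['수'] else ['박'])) [])

-- ===== PORT B =====
-- ("수박" * ((n + 1) // 2))[:n]   (str * k hand-ported as flattened replicate; exact: k ≤ 0 gives '')
def solution_alt (n : Int) : String :=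
  String.ofList (PySem.List.slice
    ((List.replicate (PySem.Int.floordiv (n + 1) 2).toNat ['수', '박']).flatten)
    none (some n))

-- ===== PRECONDITION & SPEC =====
def Spec_solution (n : Int) (out : String) : Prop := out = solution_alt n
instance (n : Int) (out : String) : Decidable (Spec_solution n out) := by unfold Spec_solution; infer_instance

-- ===== CLAIM (what is proved, stated in full; the proofs are below) =====
def Claim_equal_solution : Prop := ∀ (n : Int), Dom_solution n → Spec_solution n (solution n)

-- ===== LEMMAS AND PROOFS =====

-- the alternating character sequence both programs produce
def pvAlt (m : Nat) : List Char :=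
  (List.range m).map (fun k => if k % 2 = 0 then '수' else '박')

theorem pvAlt_succ (m : Nat) :
    pvAlt (m + 1) = pvAlt m ++ [if m % 2 = 0 then '수' else '박'] := by
  simp [pvAlt, List.range_succ]

theorem loop_eq (m : Nat) :
    (PySem.List.pyRange 1 ((m : Int) + 1) 1).foldl
      (fun acc i => acc ++ (if PySem.Int.mod i 2 ≠ 0 then ['수'] else ['박'])) [] = pvAlt m := by
  induction m with
  | zero => simp [PySem.List.pyRange_one_eq_nil, pvAlt]
  | succ m ih =>
    push_cast
    rw [PySem.List.pyRange_one_succ_right (by omega : (1:Int) ≤ (m:Int)+1),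
      List.foldl_append, pvAlt_succ]
    simp only [List.foldl_cons, List.foldl_nil, ih]
    congr 1
    have hc : (m : Int) + 1 = ((m + 1 : Nat) : Int) := by push_cast; ring
    rw [hc, show (2:Int) = ((2:Nat):Int) by norm_num, PySem.Int.mod_natCast]
    rcases Nat.even_or_odd m with he | ho
    · have h0 : m % 2 = 0 := Nat.even_iff.mp he
      have h1 : (m + 1) % 2 = 1 := by omega
      simp [h0, h1]
    · have h0 : m % 2 = 1 := Nat.odd_iff.mp ho
      have h1 : (m + 1) % 2 = 0 := by omega
      simp [h0, h1]

theorem flatten_eq (q : Nat) :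
    (List.replicate q ['수', '박']).flatten = pvAlt (2 * q) := by
  induction q with
  | zero => simp [pvAlt]
  | succ q ih =>
    have h2 : 2 * (q + 1) = 2 + 2 * q := by ring
    rw [List.replicate_succ, List.flatten_cons, ih]
    simp only [pvAlt]
    rw [h2, List.range_add, List.map_append, List.map_map]
    congr 1
    · apply List.map_congr_left
      intro k _
      simp [Function.comp]

-- ===== VERDICT (by name: the statement is the Claim_ definition above) =====
theorem solution_spec : Claim_equal_solution := by
  intro n _
  unfold Spec_solution solution solution_alt
  by_cases hn : 0 < n
  · obtain ⟨m, rfl⟩ : ∃ m : Nat, n = (m : Int) := ⟨n.toNat, (Int.toNat_of_nonneg (le_of_lt hn)).symm⟩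
    have hq : (PySem.Int.floordiv ((m : Int) + 1) 2).toNat = (m + 1) / 2 := by
      have : ((m : Int) + 1) = ((m + 1 : Nat) : Int) := by push_cast; ring
      rw [this, show (2:Int) = ((2:Nat):Int) by norm_num, PySem.Int.floordiv_natCast]
      exact Int.toNat_natCast _
    rw [loop_eq, hq, flatten_eq, PySem.List.slice_to _ (by positivity)]
    congr 1
    have hle : m ≤ 2 * ((m + 1) / 2) := by omega
    simp [pvAlt, ← List.map_take, List.take_range, Nat.min_eq_left hle]
  · have h1 : PySem.List.pyRange 1 (n + 1) 1 = [] :=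
      PySem.List.pyRange_one_eq_nil (by omega)
    have h2 : PySem.Int.floordiv (n + 1) 2 < 1 :=
      (PySem.Int.floordiv_lt_iff_lt_mul (by omega)).mpr (by omega)
    have h3 : (PySem.Int.floordiv (n + 1) 2).toNat = 0 := by omega
    rw [h1, h3]
    simp [PySem.List.slice, PySem.List.clampIdx]
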